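-- pv_equiv track=rewrite | github.com/Gael00555/Algoritmo-y-estructura-de-datos | TP N°1/Ejercicio22.py | usar_la_fuerza
-- ===== SOURCE A (Python) =====
-- def usar_la_fuerza(mochila, index=0, objetos_sacados=0):
--
--     if index >= len(mochila):
--         return False, objetos_sacados
--     else:
--         objetos_sacados += 1
--         if mochila[index] == 'sable de luz':
--             return True, objetos_sacados
--         else:
--             return usar_la_fuerza(mochila, index + 1, objetos_sacados)
-- ===== SOURCE B (Python) =====
-- def usar_la_fuerza(mochila, index=0, objetos_sacados=0):
--     # Iterative version: a for-loop over the remaining positions instead of self-recursion.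
--     for i in range(index, len(mochila)):
--         objetos_sacados += 1
--         if mochila[i] == 'sable de luz':
--             return True, objetos_sacados
--     return False, objetos_sacados
-- ===== Notes on version B (the rewrite author's own statement) =====
-- stated objective: simpler
-- what changed: Replaced the tail self-recursion with a plain for-loop over range(index, len(mochila)), keeping the same found-flag and examined-count.
import Mathlib
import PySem

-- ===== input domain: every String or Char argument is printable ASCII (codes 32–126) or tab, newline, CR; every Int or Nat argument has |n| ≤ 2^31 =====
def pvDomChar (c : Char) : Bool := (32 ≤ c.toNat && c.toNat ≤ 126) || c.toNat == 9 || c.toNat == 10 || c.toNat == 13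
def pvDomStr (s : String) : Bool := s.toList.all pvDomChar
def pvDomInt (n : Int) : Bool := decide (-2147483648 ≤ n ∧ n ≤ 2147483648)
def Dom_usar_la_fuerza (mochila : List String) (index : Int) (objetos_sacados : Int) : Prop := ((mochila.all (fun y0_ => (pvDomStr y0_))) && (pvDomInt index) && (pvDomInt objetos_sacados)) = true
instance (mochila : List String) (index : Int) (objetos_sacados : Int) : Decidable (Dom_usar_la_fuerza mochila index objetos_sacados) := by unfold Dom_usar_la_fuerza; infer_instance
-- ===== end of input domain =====

-- B replaces A's tail self-recursion by a for-loop over range(index, len(mochila)) (objective: simpler).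

-- ===== PORT A =====
-- Literal port of A's self-recursion.  The 'none' branch of pyGet? is Python's
-- IndexError (index < -len while index < len); Pre_ excludes it.
def usar_la_fuerza (mochila : List String) (index : Int) (objetos_sacados : Int) : Bool × Int :=
  if index ≥ (mochila.length : Int) then (false, objetos_sacados)
  else
    let objetos_sacados := objetos_sacados + 1
    match PySem.List.pyGet? mochila index with
    | none => (false, objetos_sacados)   -- IndexError in Python; unreachable under Pre_
    | some x =>
      if x = "sable de luz" then (true, objetos_sacados)
      else usar_la_fuerza mochila (index + 1) objetos_sacados
termination_by ((mochila.length : Int) - index).toNat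
decreasing_by omega

-- ===== PORT B =====
-- Loop body of B's 'for i in range(index, len(mochila))'.
def pvAltLoop (mochila : List String) (idxs : List Int) (objetos_sacados : Int) : Bool × Int :=
  match idxs with
  | [] => (false, objetos_sacados)
  | i :: rest =>
    let objetos_sacados := objetos_sacados + 1
    match PySem.List.pyGet? mochila i with
    | none => (false, objetos_sacados)   -- IndexError in Python; unreachable under Pre_
    | some x =>
      if x = "sable de luz" then (true, objetos_sacados)
      else pvAltLoop mochila rest objetos_sacados

def usar_la_fuerza_alt (mochila : List String) (index : Int) (objetos_sacados : Int) : Bool × Int :=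
  pvAltLoop mochila (PySem.List.pyRange index (mochila.length : Int) 1) objetos_sacados

-- ===== PRECONDITION & SPEC =====
-- Pre_ excludes exactly the inputs where Python A (and B alike) raises IndexError:
-- index below -len(mochila) while still below len(mochila).
def Pre_usar_la_fuerza (mochila : List String) (index : Int) (objetos_sacados : Int) : Prop :=
  -(mochila.length : Int) ≤ index ∨ (mochila.length : Int) ≤ index
instance (mochila : List String) (index : Int) (objetos_sacados : Int) : Decidable (Pre_usar_la_fuerza mochila index objetos_sacados) := by unfold Pre_usar_la_fuerza; infer_instance

def pvWitness_usar_la_fuerza : List String × Int × Int := (["croissant", "sable de luz"], 0, 0)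

def Spec_usar_la_fuerza (mochila : List String) (index : Int) (objetos_sacados : Int) (out : Bool × Int) : Prop := out = usar_la_fuerza_alt mochila index objetos_sacados
instance (mochila : List String) (index : Int) (objetos_sacados : Int) (out : Bool × Int) : Decidable (Spec_usar_la_fuerza mochila index objetos_sacados out) := by unfold Spec_usar_la_fuerza; infer_instance

-- ===== CLAIM (what is proved, stated in full; the proofs are below) =====
def Claim_equal_usar_la_fuerza : Prop := ∀ (mochila : List String) (index : Int) (objetos_sacados : Int), Dom_usar_la_fuerza mochila index objetos_sacados → Pre_usar_la_fuerza mochila index objetos_sacados → Spec_usar_la_fuerza mochila index objetos_sacados (usar_la_fuerza mochila index objetos_sacados)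

-- ===== LEMMAS AND PROOFS =====
theorem usar_la_fuerza_eq_loop (mochila : List String) (index objetos_sacados : Int)
    (h : -(mochila.length : Int) ≤ index) :
    usar_la_fuerza mochila index objetos_sacados
      = pvAltLoop mochila (PySem.List.pyRange index (mochila.length : Int) 1) objetos_sacados := by
  by_cases hge : index ≥ (mochila.length : Int)
  · rw [PySem.List.pyRange_one_eq_nil hge]
    unfold usar_la_fuerza
    simp [hge, pvAltLoop]
  · push_neg at hge
    rw [PySem.List.pyRange_one_cons hge]
    unfold usar_la_fuerza pvAltLoop
    simp only [not_le.mpr hge, if_neg (not_le.mpr hge)]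
    cases hx : PySem.List.pyGet? mochila index with
    | none =>
      exfalso
      rw [PySem.List.pyGet?_eq_none_iff] at hx
      exact hx ⟨h, hge⟩
    | some x =>
      by_cases hs : x = "sable de luz"
      · simp [hs]
      · simp only [hs, if_neg hs]
        exact usar_la_fuerza_eq_loop mochila (index + 1) (objetos_sacados + 1) (by omega)
termination_by ((mochila.length : Int) - index).toNat
decreasing_by omega

-- ===== VERDICT (by name: the statement is the Claim_ definition above) =====
theorem usar_la_fuerza_spec : Claim_equal_usar_la_fuerza := by
  intro mochila index objetos_sacados _ hpre
  unfold Spec_usar_la_fuerza usar_la_fuerza_alt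
  rcases hpre with h | h
  · exact usar_la_fuerza_eq_loop mochila index objetos_sacados h
  · rw [PySem.List.pyRange_one_eq_nil h]
    unfold usar_la_fuerza
    simp [h, pvAltLoop]
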